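-- pv_equiv track=rewrite | github.com/darioradio1man/cmc_msu_2019 | bitcoding.py | decode
-- ===== SOURCE A (Python) =====
-- from functools import reduce
--
-- def xehs(s):
--     if not hasattr(xehs, 'table'):
--         xehs.table = ' !"#$%&\'()*+,-./0123456789:;<=>?@ABCDEFGHIJKLMNOPQRSTUVWXYZ[\\]^_'
--     result = reduce(lambda x, y: x*64+(xehs.table.find(y)), s.strip().upper(), 0)
--     return result
--
-- def decode(length, char, code):
--     dictionary = {}
--     begin = 1
--     for k in char:
--         dictionary[begin] = k
--         begin *= 2
--
--     result = []
--     tchar = 1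
--     decisions = xehs(code)
--     while decisions:
--         if decisions & 1:
--             tchar *= 2
--         else:
--             result.append(dictionary[tchar])
--             tchar = 1
--         decisions >>= 1
--     result.append(dictionary[tchar])
--     return "".join(result[::-1][:length])
-- ===== SOURCE B (Python) =====
-- def decode(length, char, code):
--     # Stream 6 bits per code character (MSB first), skip the leading zero bits,
--     # then turn each maximal run of one-bits (delimited by zero-bits) into char[run]
--     # directly -- no big integer, no powers-of-two dictionary.
--     table = ' !"#$%&\'()*+,-./0123456789:;<=>?@ABCDEFGHIJKLMNOPQRSTUVWXYZ[\\]^_'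
--     bits = []
--     for y in code.strip().upper():
--         v = table.find(y)
--         for shift in (5, 4, 3, 2, 1, 0):
--             bits.append((v >> shift) & 1)
--     i = 0
--     while i < len(bits) and bits[i] == 0:
--         i += 1
--     out = []
--     run = 0
--     for b in bits[i:]:
--         if b:
--             run += 1
--         else:
--             out.append(char[run])
--             run = 0
--     out.append(char[run])
--     return "".join(out[:length])
-- ===== Notes on version B (the rewrite author's own statement) =====
-- stated objective: faster
-- what changed: B streams 6 bits per code character into a bit list and converts each maximal run of one-bits directly into char[run] in a single pass, instead of folding the whole code into one big integer (quadratic bignum arithmetic) and peeling its bits LSB-first through a powers-of-two dictionary plus a final list reversal.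
-- outside the precondition, e.g. on decode(10, 'ABCDEFGH', '!`'): A returns 'G', B returns 'H'
import Mathlib
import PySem

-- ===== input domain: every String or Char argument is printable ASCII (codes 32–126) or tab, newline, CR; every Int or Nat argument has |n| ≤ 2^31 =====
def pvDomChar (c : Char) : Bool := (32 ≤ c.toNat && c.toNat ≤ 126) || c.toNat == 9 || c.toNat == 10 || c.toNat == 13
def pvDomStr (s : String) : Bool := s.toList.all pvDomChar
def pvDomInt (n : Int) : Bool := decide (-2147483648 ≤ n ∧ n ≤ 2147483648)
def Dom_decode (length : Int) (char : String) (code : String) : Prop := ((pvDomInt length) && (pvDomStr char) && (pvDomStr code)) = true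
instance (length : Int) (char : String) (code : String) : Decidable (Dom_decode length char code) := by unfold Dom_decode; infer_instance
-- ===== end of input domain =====

-- B streams 6 bits per code character and maps each maximal run of one-bits directly to
-- char[run] in one pass, instead of folding the code into one big integer (quadratic) and
-- peeling its bits through a powers-of-two dictionary; objective: faster (O(n) vs O(n^2)).

-- ===== PORT A =====
def pvTable : String := " !\"#$%&'()*+,-./0123456789:;<=>?@ABCDEFGHIJKLMNOPQRSTUVWXYZ[\\]^_"

-- floor division is Lean's ediv for a nonnegative divisor (cited by decodeLoop's decreasing_by)
theorem pv_fdiv2 (x k : Int) (hk : 0 ≤ k) : PySem.Int.floordiv x k = x / k := by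
  simp [PySem.Int.floordiv, Int.fdiv_eq_ediv, hk]

-- reduce(lambda x, y: x*64 + table.find(y), s.strip().upper(), 0)
def xehs (s : String) : Int :=
  (PySem.Str.upper (PySem.Str.strip s)).toList.foldl
    (fun x y => x * 64 + PySem.Str.find pvTable (String.ofList [y])) 0

-- dictionary = {}; begin = 1; for k in char: dictionary[begin] = k; begin *= 2
def pvBuildDict (char : String) : PySem.Dict Int String × Int :=
  char.toList.foldl
    (fun st k => (st.1.insert st.2 (String.ofList [k]), st.2 * 2))
    (PySem.Dict.empty, 1)

-- the 'while decisions:' loop; 'decisions & 1' = fmod 2, 'decisions >>= 1' = fdiv 2 (exact).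
-- Python diverges for negative decisions (excluded by Pre_); we stop at 'decisions ≤ 0'.
-- dictionary[tchar] on a missing key is a KeyError in Python (excluded by Pre_): getD "".
def decodeLoop (dict : PySem.Dict Int String) (decisions tchar : Int)
    (result : List String) : List String × Int :=
  if _h : decisions ≤ 0 then (result, tchar)
  else if PySem.Int.mod decisions 2 = 1 then
    decodeLoop dict (PySem.Int.floordiv decisions 2) (tchar * 2) result
  else
    decodeLoop dict (PySem.Int.floordiv decisions 2) 1 (result ++ [dict.getD tchar ""])
termination_by decisions.toNat
decreasing_by
  all_goals simp only [pv_fdiv2 _ 2 (by norm_num)]; omega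

def decode (length : Int) (char : String) (code : String) : String :=
  let dictionary := (pvBuildDict char).1
  let decisions := xehs code
  let p := decodeLoop dictionary decisions 1 []
  let result := p.1 ++ [dictionary.getD p.2 ""]
  -- "".join(result[::-1][:length])
  PySem.Str.join "" (PySem.List.slice result.reverse none (some length))

-- ===== PORT B =====
-- char[i] (1-char string); out-of-range is an IndexError in Python (excluded by Pre_): getD "".
def pvCharAt (char : String) (i : Int) : String :=
  ((PySem.Str.pyGet? char i).map (fun c => String.ofList [c])).getD ""

-- the six bits (v >> shift) & 1 for shift = 5,4,3,2,1,0 ( >> = fdiv by 2^shift, & 1 = fmod 2; exact)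
def pvChunk6 (v : Int) : List Int :=
  [PySem.Int.mod (PySem.Int.floordiv v 32) 2,
   PySem.Int.mod (PySem.Int.floordiv v 16) 2,
   PySem.Int.mod (PySem.Int.floordiv v 8) 2,
   PySem.Int.mod (PySem.Int.floordiv v 4) 2,
   PySem.Int.mod (PySem.Int.floordiv v 2) 2,
   PySem.Int.mod (PySem.Int.floordiv v 1) 2]

-- the 'for b in bits[i:]:' loop of B: run counter + emitted characters
def emitLoop (char : String) (run : Int) (bs : List Int) (out : List String) :
    List String × Int :=
  match bs with
  | [] => (out, run)
  | b :: rest =>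
    if b ≠ 0 then emitLoop char (run + 1) rest out
    else emitLoop char 0 rest (out ++ [pvCharAt char run])

def decode_alt (length : Int) (char : String) (code : String) : String :=
  let bits := (PySem.Str.upper (PySem.Str.strip code)).toList.flatMap
    (fun y => pvChunk6 (PySem.Str.find pvTable (String.ofList [y])))
  -- the index-advance loop followed by bits[i:] drops the leading zero bits
  let bs := bits.dropWhile (fun b => b == 0)
  let p := emitLoop char 0 bs []
  let out := p.1 ++ [pvCharAt char p.2]
  -- "".join(out[:length])
  PySem.Str.join "" (PySem.List.slice out none (some length))

-- ===== PRECONDITION & SPEC =====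
-- run-of-one-bits check: at every zero bit and at the end of the stream the current run
-- length must be < k (k = len(char)) — exactly when every dictionary[tchar] lookup succeeds
def pvRunsOK (k : Int) (run : Int) : List Int → Bool
  | [] => decide (run < k)
  | b :: rest => if b == 0 then decide (run < k) && pvRunsOK k 0 rest else pvRunsOK k (run + 1) rest

-- Pre_ excludes (a) codes with a character outside the 64-character table: such codes are
-- malformed and A may diverge, raise KeyError, or fold the -1 sentinel into an accidental
-- value — a corner neither behaviour specifies; and (b) inputs where some run of one-bits
-- reaches len(char), on which A raises KeyError.
def Pre_decode (length : Int) (char : String) (code : String) : Prop :=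
  ((PySem.Str.upper (PySem.Str.strip code)).toList.all
      (fun y => decide (0 ≤ PySem.Str.find pvTable (String.ofList [y]))) = true) ∧
  pvRunsOK (char.toList.length : Int) 0
    ((PySem.Str.upper (PySem.Str.strip code)).toList.flatMap
      (fun y => pvChunk6 (PySem.Str.find pvTable (String.ofList [y])))) = true

instance (length : Int) (char : String) (code : String) : Decidable (Pre_decode length char code) := by
  unfold Pre_decode; infer_instance

def pvWitness_decode : Int × String × String := (1, "A", "")

def Spec_decode (length : Int) (char : String) (code : String) (out : String) : Prop :=
  out = decode_alt length char code
instance (length : Int) (char : String) (code : String) (out : String) : Decidable (Spec_decode length char code out) := by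
  unfold Spec_decode; infer_instance

-- ===== CLAIM (what is proved, stated in full; the proofs are below) =====
def Claim_equal_decode : Prop := ∀ (length : Int) (char : String) (code : String), Dom_decode length char code → Pre_decode length char code → Spec_decode length char code (decode length char code)

-- ===== LEMMAS AND PROOFS =====

theorem pv_fmod2 (x k : Int) (hk : 0 ≤ k) : PySem.Int.mod x k = x % k := by
  simp [PySem.Int.mod, Int.fmod_eq_emod, hk]

-- binary expansion of n, most significant bit first (empty for n ≤ 0)
def binMSB (n : Int) : List Int :=
  if _h : n ≤ 0 then [] else binMSB (n / 2) ++ [n % 2]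
termination_by n.toNat
decreasing_by omega

-- pure versions of emitLoop's two accumulators
def pvOuts (char : String) (run : Int) : List Int → List String
  | [] => []
  | b :: rest => if b ≠ 0 then pvOuts char (run + 1) rest
                 else pvCharAt char run :: pvOuts char 0 rest

def pvFin (run : Int) : List Int → Int
  | [] => run
  | b :: rest => if b ≠ 0 then pvFin (run + 1) rest else pvFin 0 rest

theorem emitLoop_eq (char : String) (bs : List Int) : ∀ (run : Int) (out : List String),
    emitLoop char run bs out = (out ++ pvOuts char run bs, pvFin run bs) := by
  induction bs with
  | nil => intro run out; simp [emitLoop, pvOuts, pvFin]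
  | cons b rest ih =>
      intro run out
      by_cases hb : b ≠ 0 <;> simp [emitLoop, pvOuts, pvFin, hb, ih]

theorem pvOuts_append (char : String) (xs ys : List Int) : ∀ (r : Int),
    pvOuts char r (xs ++ ys) = pvOuts char r xs ++ pvOuts char (pvFin r xs) ys := by
  induction xs with
  | nil => intro r; simp [pvOuts, pvFin]
  | cons b rest ih =>
      intro r; by_cases hb : b ≠ 0 <;> simp [pvOuts, pvFin, hb, ih]

theorem pvFin_append (xs ys : List Int) : ∀ (r : Int),
    pvFin r (xs ++ ys) = pvFin (pvFin r xs) ys := by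
  induction xs with
  | nil => intro r; simp [pvFin]
  | cons b rest ih =>
      intro r; by_cases hb : b ≠ 0 <;> simp [pvFin, hb, ih]

theorem pvOuts_ones (char : String) (k : Nat) : ∀ (r : Int),
    pvOuts char r (List.replicate k 1) = [] := by
  induction k with
  | zero => intro r; simp [pvOuts]
  | succ n ih => intro r; simp [List.replicate, pvOuts, ih]

theorem pvFin_ones (k : Nat) : ∀ (r : Int),
    pvFin r (List.replicate k 1) = r + k := by
  induction k with
  | zero => intro r; simp [pvFin]
  | succ n ih => intro r; simp [List.replicate, pvFin, ih]; ring

-- ===== the dictionary built by A maps 2^j to char[j] =====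

theorem dict_fold_lower (cs : List Char) : ∀ (d : PySem.Dict Int String) (b k : Int),
    1 ≤ b → k < b →
    ((cs.foldl (fun st k => (st.1.insert st.2 (String.ofList [k]), st.2 * 2)) (d, b)).1).getD k ""
      = d.getD k "" := by
  induction cs with
  | nil => intro d b k _ _; rfl
  | cons c rest ih =>
      intro d b k hb hk
      simp only [List.foldl_cons]
      rw [ih (d.insert b (String.ofList [c])) (b * 2) k (by omega) (by omega)]
      rw [PySem.Dict.getD_insert]
      simp [show k ≠ b by omega]

theorem dict_fold_get (cs : List Char) : ∀ (d : PySem.Dict Int String) (b : Int), 1 ≤ b →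
    ∀ j : Nat,
    ((cs.foldl (fun st k => (st.1.insert st.2 (String.ofList [k]), st.2 * 2)) (d, b)).1).getD (b * 2 ^ j) ""
      = if h : j < cs.length then String.ofList [cs[j]] else d.getD (b * 2 ^ j) "" := by
  induction cs with
  | nil =>
      intro d b hb j
      simp
  | cons c rest ih =>
      intro d b hb j
      have hpow : (1 : Int) ≤ 2 ^ j := one_le_pow₀ (by norm_num)
      simp only [List.foldl_cons]
      cases j with
      | zero =>
          rw [show b * 2 ^ 0 = b by ring]
          rw [dict_fold_lower rest (d.insert b (String.ofList [c])) (b * 2) b (by omega) (by omega)]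
          rw [PySem.Dict.getD_insert]
          simp
      | succ j' =>
          have hpow' : (1 : Int) ≤ 2 ^ j' := one_le_pow₀ (by norm_num)
          rw [show b * 2 ^ (j' + 1) = (b * 2) * 2 ^ j' by ring]
          rw [ih (d.insert b (String.ofList [c])) (b * 2) (by omega) j']
          by_cases h : j' < rest.length
          · simp [h]
          · have hne : b * 2 ^ (j' + 1) ≠ b := by
              have h2 : (2 : Int) ^ (j' + 1) = 2 * 2 ^ j' := by ring
              rw [h2]; nlinarith
            simp only [dif_neg h, dif_neg (by simpa using h : ¬ j' + 1 < (c :: rest).length)]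
            rw [PySem.Dict.getD_insert]
            simp [show (b * 2) * 2 ^ j' = b * 2 ^ (j' + 1) by ring, hne]

theorem dict_pow (char : String) (j : Nat) :
    ((pvBuildDict char).1).getD ((2 : Int) ^ j) "" = pvCharAt char (j : Int) := by
  unfold pvBuildDict
  have h := dict_fold_get char.toList PySem.Dict.empty 1 (le_refl 1) j
  rw [show (2 : Int) ^ j = 1 * 2 ^ j by ring, h]
  have hlen : char.toList.length = char.length := by simp
  by_cases hj : j < char.toList.length
  · simp [hj, pvCharAt, List.getElem?_eq_getElem hj, hlen ▸ hj]
  · have h0 : char.toList[(j:Nat)]? = none := List.getElem?_eq_none (by omega)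
    simp [hj, pvCharAt, h0, PySem.Dict.getD, PySem.Dict.get?, PySem.Dict.empty]
    omega

-- ===== A's loop, characterised =====

theorem decodeLoop_acc (n : Nat) : ∀ (d : Int), d.toNat = n →
    ∀ (dict : PySem.Dict Int String) (t : Int) (acc : List String),
    decodeLoop dict d t acc =
      (acc ++ (decodeLoop dict d t []).1, (decodeLoop dict d t []).2) := by
  induction n using Nat.strong_induction_on with
  | _ n ih =>
    intro d hd dict t acc
    rw [decodeLoop]
    conv_rhs => rw [decodeLoop]
    by_cases h : d ≤ 0
    · simp [h]
    · have hlt : (PySem.Int.floordiv d 2).toNat < n := by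
        rw [pv_fdiv2 _ 2 (by norm_num)]; omega
      by_cases hm : PySem.Int.mod d 2 = 1
      · simp only [dif_neg h, if_pos hm]
        exact ih _ hlt _ rfl dict (t * 2) acc
      · simp only [dif_neg h, if_neg hm]
        rw [ih _ hlt _ rfl dict 1 (acc ++ [dict.getD t ""]),
            ih _ hlt _ rfl dict 1 ([] ++ [dict.getD t ""])]
        simp

theorem decodeLoop_spec (char : String) (m : Nat) : ∀ (r : Nat),
    (let p := decodeLoop (pvBuildDict char).1 (m : Int) ((2 : Int) ^ r) [];
     ((pvBuildDict char).1.getD p.2 "") :: p.1.reverse)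
    = pvOuts char 0 (binMSB (m : Int) ++ List.replicate r (1 : Int))
      ++ [pvCharAt char (pvFin 0 (binMSB (m : Int) ++ List.replicate r (1 : Int)))] := by
  induction m using Nat.strong_induction_on with
  | _ m ih =>
    intro r
    by_cases h0 : m = 0
    · subst h0
      rw [decodeLoop]
      have hb0 : binMSB (0 : Int) = [] := by rw [binMSB]; simp
      simp [hb0, pvOuts_ones, pvFin_ones, dict_pow, pvOuts, pvFin]
    · have hm : ¬ ((m : Int) ≤ 0) := by push_cast; omega
      have hdiv : PySem.Int.floordiv (m : Int) 2 = ((m / 2 : Nat) : Int) := by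
        rw [pv_fdiv2 _ 2 (by norm_num)]; omega
      have hmod : PySem.Int.mod (m : Int) 2 = ((m % 2 : Nat) : Int) := by
        rw [pv_fmod2 _ 2 (by norm_num)]; omega
      rw [decodeLoop]
      simp only [dif_neg hm, hmod, hdiv]
      by_cases hp : m % 2 = 1
      · have hbin : binMSB (m : Int) = binMSB ((m / 2 : Nat) : Int) ++ [(1 : Int)] := by
          have e1 : (m : Int) / 2 = ((m / 2 : Nat) : Int) := by omega
          have e2 : (m : Int) % 2 = 1 := by omega
          rw [binMSB, dif_neg hm, e1, e2]
        rw [if_pos (by rw [hp]; norm_num)]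
        rw [show (2 : Int) ^ r * 2 = 2 ^ (r + 1) by ring]
        rw [ih (m / 2) (by omega) (r + 1)]
        rw [hbin]
        simp [List.append_assoc, List.replicate_succ]
      · have hp0 : m % 2 = 0 := by omega
        have hbin : binMSB (m : Int) = binMSB ((m / 2 : Nat) : Int) ++ [(0 : Int)] := by
          have e1 : (m : Int) / 2 = ((m / 2 : Nat) : Int) := by omega
          have e2 : (m : Int) % 2 = 0 := by omega
          rw [binMSB, dif_neg hm, e1, e2]
        rw [if_neg (by rw [hp0]; norm_num)]
        rw [decodeLoop_acc ((m / 2 : Nat) : Int).toNat _ rfl]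
        have hi := ih (m / 2) (by omega) 0
        rw [show (2 : Int) ^ 0 = 1 from by norm_num] at hi
        simp only [List.replicate_zero, List.append_nil] at hi
        rw [hbin]
        have hout := pvOuts_append char (binMSB ((m / 2 : Nat) : Int)) ([0] ++ List.replicate r 1) 0
        have hfin := pvFin_append (binMSB ((m / 2 : Nat) : Int)) ([0] ++ List.replicate r 1) 0
        simp only [← List.append_assoc] at *
        rw [List.append_assoc, hout, hfin]
        simp only [List.cons_append, List.nil_append, pvOuts, pvFin]
        simp only [ne_eq, not_true_eq_false, if_false, reduceIte]
        rw [pvOuts_ones, pvFin_ones]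
        simp only [List.reverse_append, List.reverse_cons, List.reverse_nil, List.nil_append,
          List.singleton_append]
        rw [dict_pow]
        rw [← hi]
        simp [pvFin_ones]

-- ===== the 6-bit stream carries the same number =====

theorem chunk6_bits (v : Int) : ∀ b ∈ pvChunk6 v, b = 0 ∨ b = 1 := by
  intro b hb
  simp only [pvChunk6, List.mem_cons, List.not_mem_nil, or_false,
    pv_fmod2 _ 2 (by norm_num)] at hb
  rcases hb with h | h | h | h | h | h <;> subst h <;> omega

theorem chunk6_fold (v : Int) (hv0 : 0 ≤ v) (hv : v < 64) (a : Int) :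
    (pvChunk6 v).foldl (fun x b => 2 * x + b) a = 64 * a + v := by
  simp only [pvChunk6, List.foldl_cons, List.foldl_nil,
    pv_fmod2 _ 2 (by norm_num), pv_fdiv2 _ 32 (by norm_num), pv_fdiv2 _ 16 (by norm_num),
    pv_fdiv2 _ 8 (by norm_num), pv_fdiv2 _ 4 (by norm_num), pv_fdiv2 _ 2 (by norm_num),
    pv_fdiv2 _ 1 (by norm_num)]
  omega

theorem find_lt_64 (y : Char) : PySem.Str.find pvTable (String.ofList [y]) < 64 := by
  have hb : PySem.Str.find pvTable (String.ofList [y]) = PySem.Chars.find pvTable.toList [y] := by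
    simp
  rw [hb]
  rcases lt_or_ge (PySem.Chars.find pvTable.toList [y]) 0 with h | h
  · omega
  · obtain ⟨hpre, -⟩ := PySem.Chars.find_spec (s := pvTable.toList) (sub := [y]) h
    have hne : pvTable.toList.drop (PySem.Chars.find pvTable.toList [y]).toNat ≠ [] := by
      intro he
      rw [he] at hpre
      exact List.cons_ne_nil _ _ (List.prefix_nil.mp hpre)
    have hlt : (PySem.Chars.find pvTable.toList [y]).toNat < pvTable.toList.length := by
      by_contra hge
      push_neg at hge
      exact hne (List.drop_eq_nil_of_le hge)
    have h64 : pvTable.toList.length = 64 := by decide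
    omega

theorem flatMap_fold (ds : List Int) : (∀ v ∈ ds, 0 ≤ v ∧ v < 64) → ∀ a : Int,
    (ds.flatMap pvChunk6).foldl (fun x b => 2 * x + b) a
      = ds.foldl (fun x v => x * 64 + v) a := by
  induction ds with
  | nil => intro _ a; rfl
  | cons v rest ih =>
      intro h a
      obtain ⟨hv0, hv64⟩ := h v (by simp)
      simp only [List.flatMap_cons, List.foldl_append, List.foldl_cons]
      rw [chunk6_fold v hv0 hv64 a, ih (fun w hw => h w (by simp [hw]))]
      ring_nf

theorem binMSB_mul2add (a b : Int) (ha : 1 ≤ a) (hb : b = 0 ∨ b = 1) :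
    binMSB (2 * a + b) = binMSB a ++ [b] := by
  rw [binMSB]
  rw [dif_neg (by omega)]
  congr 1
  · congr 1; omega
  · congr 1; omega

theorem binMSB_fold (bs : List Int) : (∀ b ∈ bs, b = 0 ∨ b = 1) → ∀ a : Int, 1 ≤ a →
    binMSB (bs.foldl (fun x b => 2 * x + b) a) = binMSB a ++ bs := by
  induction bs with
  | nil => intro _ a _; simp
  | cons b rest ih =>
      intro h a ha
      simp only [List.foldl_cons]
      rw [ih (fun w hw => h w (by simp [hw])) (2 * a + b) (by rcases h b (by simp) with h' | h' <;> omega)]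
      rw [binMSB_mul2add a b ha (h b (by simp))]
      simp

theorem dropWhile_binMSB (bs : List Int) : (∀ b ∈ bs, b = 0 ∨ b = 1) →
    bs.dropWhile (fun b => b == 0) = binMSB (bs.foldl (fun x b => 2 * x + b) 0) := by
  induction bs with
  | nil => intro _; rw [binMSB]; simp
  | cons b rest ih =>
      intro h
      rcases h b (by simp) with hb | hb <;> subst hb
      · simp only [List.dropWhile_cons, List.foldl_cons]
        norm_num
        exact ih (fun w hw => h w (by simp [hw]))
      · have h1 : binMSB 1 = [1] := by
          rw [binMSB]
          rw [dif_neg (by norm_num)]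
          norm_num
          rw [binMSB]
          simp
        simp only [List.dropWhile_cons, List.foldl_cons]
        norm_num
        rw [binMSB_fold rest (fun w hw => h w (by simp [hw])) 1 (by norm_num), h1]
        rfl

theorem fold_nonneg (bs : List Int) : (∀ b ∈ bs, b = 0 ∨ b = 1) → ∀ a : Int, 0 ≤ a →
    0 ≤ bs.foldl (fun x b => 2 * x + b) a := by
  induction bs with
  | nil => intro _ a ha; simpa
  | cons b rest ih =>
      intro h a ha
      simp only [List.foldl_cons]
      exact ih (fun w hw => h w (by simp [hw])) (2 * a + b)
        (by rcases h b (by simp) with h' | h' <;> omega)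

-- ===== VERDICT (by name: the statement is the Claim_ definition above) =====
theorem decode_spec : Claim_equal_decode := by
  intro length char code _hdom hpre
  obtain ⟨hvalid', -⟩ := hpre
  have hvalid : ∀ y ∈ (PySem.Str.upper (PySem.Str.strip code)).toList,
      0 ≤ PySem.Str.find pvTable (String.ofList [y]) := by
    intro y hy
    simpa using List.all_eq_true.mp hvalid' y hy
  unfold Spec_decode
  simp only [decode, decode_alt]
  have hds : ∀ v ∈ (PySem.Str.upper (PySem.Str.strip code)).toList.map
      (fun y => PySem.Str.find pvTable (String.ofList [y])), 0 ≤ v ∧ v < 64 := by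
    intro v hv
    obtain ⟨y, hy, rfl⟩ := List.mem_map.mp hv
    exact ⟨hvalid y hy, find_lt_64 y⟩
  have hfm : (PySem.Str.upper (PySem.Str.strip code)).toList.flatMap
      (fun y => pvChunk6 (PySem.Str.find pvTable (String.ofList [y])))
      = ((PySem.Str.upper (PySem.Str.strip code)).toList.map
          (fun y => PySem.Str.find pvTable (String.ofList [y]))).flatMap pvChunk6 := by
    simp [List.flatMap_map]
  have hbits01 : ∀ b ∈ (PySem.Str.upper (PySem.Str.strip code)).toList.flatMap
      (fun y => pvChunk6 (PySem.Str.find pvTable (String.ofList [y]))), b = 0 ∨ b = 1 := by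
    intro b hb
    obtain ⟨y, -, hb⟩ := List.mem_flatMap.mp hb
    exact chunk6_bits _ b hb
  have hfold : ((PySem.Str.upper (PySem.Str.strip code)).toList.flatMap
      (fun y => pvChunk6 (PySem.Str.find pvTable (String.ofList [y])))).foldl
        (fun x b => 2 * x + b) 0 = xehs code := by
    rw [hfm, flatMap_fold _ hds 0]
    unfold xehs
    rw [List.foldl_map]
  have hN0 : 0 ≤ xehs code := by
    rw [← hfold]
    exact fold_nonneg _ hbits01 0 (le_refl 0)
  have hm : (((xehs code).toNat : Nat) : Int) = xehs code := Int.toNat_of_nonneg hN0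
  have hdrop : ((PySem.Str.upper (PySem.Str.strip code)).toList.flatMap
      (fun y => pvChunk6 (PySem.Str.find pvTable (String.ofList [y])))).dropWhile
        (fun b => b == 0) = binMSB (xehs code) := by
    rw [dropWhile_binMSB _ hbits01, hfold]
  have hA := decodeLoop_spec char (xehs code).toNat 0
  rw [hm] at hA
  simp only [pow_zero, List.replicate_zero, List.append_nil] at hA
  rw [emitLoop_eq, hdrop]
  simp only [List.reverse_append, List.reverse_cons, List.reverse_nil, List.nil_append,
    List.singleton_append]
  rw [hA]
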